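-- pv_equiv track=rewrite | github.com/zilliztech/memsearch | src/memsearch/reranker.py | _find_onnx_file
-- ===== SOURCE A (Python) =====
-- def _find_onnx_file(repo_id: str, repo_files: list[str]) -> str:
--     """Pick the best ONNX file from a repo's file listing."""
--     onnx_files = [f for f in repo_files if f.endswith(".onnx")]
--     if not onnx_files:
--         raise ValueError(
--             f"No .onnx files found in {repo_id}. "
--             f"Export one with: optimum-cli export onnx --model {repo_id} output/"
--         )
--     for preferred in [
--         "onnx/model_quantized.onnx",
--         "onnx/model_int8.onnx",
--         "onnx/model.onnx",
--         "model_quantized.onnx",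
--         "model.onnx",
--     ]:
--         if preferred in onnx_files:
--             return preferred
--     return onnx_files[0]
-- ===== SOURCE B (Python) =====
-- _RANK = {
--     "onnx/model_quantized.onnx": 0,
--     "onnx/model_int8.onnx": 1,
--     "onnx/model.onnx": 2,
--     "model_quantized.onnx": 3,
--     "model.onnx": 4,
-- }
--
--
-- def _find_onnx_file(repo_id: str, repo_files: list[str]) -> str:
--     """Pick the best ONNX file from a repo's file listing."""
--     best = None  # (rank, file) of the best .onnx file seen so far
--     for f in repo_files:
--         if f.endswith(".onnx"):
--             r = _RANK.get(f, len(_RANK))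
--             if best is None or r < best[0]:
--                 best = (r, f)
--     if best is None:
--         raise ValueError(
--             f"No .onnx files found in {repo_id}. "
--             f"Export one with: optimum-cli export onnx --model {repo_id} output/"
--         )
--     return best[1]
-- ===== Notes on version B (the rewrite author's own statement) =====
-- stated objective: alternative
-- what changed: Replaces A's filter pass plus five sequential 'preferred in onnx_files' membership scans by one fold over repo_files that keeps a (rank, file) accumulator using a rank dict, with strict-less update reproducing A's first-match/first-onnx tie-breaking.
import Mathlib
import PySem

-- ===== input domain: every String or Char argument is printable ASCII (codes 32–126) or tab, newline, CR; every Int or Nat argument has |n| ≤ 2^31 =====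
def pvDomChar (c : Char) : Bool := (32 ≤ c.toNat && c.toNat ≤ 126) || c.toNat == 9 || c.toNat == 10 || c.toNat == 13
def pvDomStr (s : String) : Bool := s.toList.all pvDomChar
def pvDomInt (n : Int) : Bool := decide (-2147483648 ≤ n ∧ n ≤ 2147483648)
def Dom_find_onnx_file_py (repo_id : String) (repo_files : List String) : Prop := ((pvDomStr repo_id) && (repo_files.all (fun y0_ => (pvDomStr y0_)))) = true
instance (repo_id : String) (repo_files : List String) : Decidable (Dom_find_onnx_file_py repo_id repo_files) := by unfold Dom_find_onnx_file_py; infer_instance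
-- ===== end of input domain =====

-- B replaces A's filter pass plus five sequential membership scans by ONE fold over
-- repo_files keeping a (rank, file) accumulator via a rank dict (objective: alternative).

-- ===== PORT A =====
-- the literal preference list of A's for-loop
def pvPreferred : List String :=
  ["onnx/model_quantized.onnx", "onnx/model_int8.onnx", "onnx/model.onnx",
   "model_quantized.onnx", "model.onnx"]

def find_onnx_file_py (repo_id : String) (repo_files : List String) : String :=
  let onnx_files := repo_files.filter (fun f => PySem.Str.endswith f ".onnx")
  -- Python raises ValueError when onnx_files = [] (excluded by Pre_); "" stands in there
  match pvPreferred.find? (fun preferred => onnx_files.contains preferred) with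
  | some preferred => preferred
  | none => onnx_files.headD ""

-- ===== PORT B =====
-- the literal _RANK dict of Source B
def pvRank : PySem.Dict String Int :=
  ⟨[("onnx/model_quantized.onnx", 0), ("onnx/model_int8.onnx", 1), ("onnx/model.onnx", 2),
    ("model_quantized.onnx", 3), ("model.onnx", 4)]⟩

-- one iteration of Source B's loop body: update the (rank, file) accumulator
def pvStepB (best : Option (Int × String)) (f : String) : Option (Int × String) :=
  if PySem.Str.endswith f ".onnx" then
    let r := PySem.Dict.getD pvRank f 5
    match best with
    | none => some (r, f)
    | some b => if r < b.1 then some (r, f) else some b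
  else best

def find_onnx_file_py_alt (repo_id : String) (repo_files : List String) : String :=
  -- Python raises ValueError when best stays None (excluded by Pre_); "" stands in there
  match repo_files.foldl pvStepB none with
  | some b => b.2
  | none => ""

-- ===== PRECONDITION & SPEC =====
-- Pre_ excludes exactly the listings with no ".onnx" file, on which both Pythons raise ValueError.
def Pre_find_onnx_file_py (repo_id : String) (repo_files : List String) : Prop :=
  ∃ f ∈ repo_files, PySem.Str.endswith f ".onnx" = true
instance (repo_id : String) (repo_files : List String) : Decidable (Pre_find_onnx_file_py repo_id repo_files) := by unfold Pre_find_onnx_file_py; infer_instance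

def pvWitness_find_onnx_file_py : String × List String :=
  ("org/repo", ["README.md", "model.onnx", "onnx/model.onnx"])

def Spec_find_onnx_file_py (repo_id : String) (repo_files : List String) (out : String) : Prop := out = find_onnx_file_py_alt repo_id repo_files
instance (repo_id : String) (repo_files : List String) (out : String) : Decidable (Spec_find_onnx_file_py repo_id repo_files out) := by unfold Spec_find_onnx_file_py; infer_instance

-- ===== CLAIM (what is proved, stated in full; the proofs are below) =====
def Claim_equal_find_onnx_file_py : Prop := ∀ (repo_id : String) (repo_files : List String), Dom_find_onnx_file_py repo_id repo_files → Pre_find_onnx_file_py repo_id repo_files → Spec_find_onnx_file_py repo_id repo_files (find_onnx_file_py repo_id repo_files)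

-- ===== LEMMAS AND PROOFS =====

-- B's rank key
def pvKey (f : String) : Int := PySem.Dict.getD pvRank f 5

-- A's choice as a function of the filtered list alone
def pvAres (l : List String) : String :=
  match pvPreferred.find? (fun preferred => l.contains preferred) with
  | some preferred => preferred
  | none => l.headD ""

theorem pvKey_eq (f : String) :
    pvKey f = if f = "onnx/model_quantized.onnx" then 0
      else if f = "onnx/model_int8.onnx" then 1
      else if f = "onnx/model.onnx" then 2
      else if f = "model_quantized.onnx" then 3
      else if f = "model.onnx" then 4 else 5 := by
  simp only [pvKey, pvRank, PySem.Dict.getD, PySem.Dict.get?, List.find?_cons, List.find?_nil]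
  by_cases h0 : f = "onnx/model_quantized.onnx" <;>
  by_cases h1 : f = "onnx/model_int8.onnx" <;>
  by_cases h2 : f = "onnx/model.onnx" <;>
  by_cases h3 : f = "model_quantized.onnx" <;>
  by_cases h4 : f = "model.onnx" <;>
    simp_all [show ∀ a b : String, (a == b) = decide (a = b) from fun a b => rfl, eq_comm]

theorem pvAres_single (h : String) : pvAres [h] = h := by
  unfold pvAres pvPreferred
  by_cases h0 : h = "onnx/model_quantized.onnx" <;>
  by_cases h1 : h = "onnx/model_int8.onnx" <;>
  by_cases h2 : h = "onnx/model.onnx" <;>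
  by_cases h3 : h = "model_quantized.onnx" <;>
  by_cases h4 : h = "model.onnx" <;>
    simp_all [List.find?_nil, eq_comm]

-- strict-less update on A's choice over the list so far extends A's choice by one element
set_option maxHeartbeats 2000000 in
theorem pvStep (l : List String) (f : String) (hl : l ≠ []) :
    (if pvKey f < pvKey (pvAres l) then f else pvAres l) = pvAres (l ++ [f]) := by
  cases l with
  | nil => exact absurd rfl hl
  | cons a t =>
    rw [pvKey_eq f]
    unfold pvAres pvPreferred
    simp only [List.find?_cons, List.find?_nil, List.contains_append]
    cases c0 : (a :: t).contains "onnx/model_quantized.onnx" <;>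
    cases c1 : (a :: t).contains "onnx/model_int8.onnx" <;>
    cases c2 : (a :: t).contains "onnx/model.onnx" <;>
    cases c3 : (a :: t).contains "model_quantized.onnx" <;>
    cases c4 : (a :: t).contains "model.onnx" <;>
    by_cases hf0 : f = "onnx/model_quantized.onnx" <;>
    by_cases hf1 : f = "onnx/model_int8.onnx" <;>
    by_cases hf2 : f = "onnx/model.onnx" <;>
    by_cases hf3 : f = "model_quantized.onnx" <;>
    by_cases hf4 : f = "model.onnx" <;>
      (try simp_all [pvKey_eq]) <;> (try simp_all [eq_comm])

-- loop invariant: Source B's fold over l holds (pvKey m, m) where m is A's choice on the filtered l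
theorem pvInv (l : List String) :
    l.foldl pvStepB none =
      (match l.filter (fun f => PySem.Str.endswith f ".onnx") with
       | [] => none
       | _ :: _ => some (pvKey (pvAres (l.filter (fun f => PySem.Str.endswith f ".onnx"))),
                         pvAres (l.filter (fun f => PySem.Str.endswith f ".onnx")))) := by
  induction l using List.reverseRecOn with
  | nil => rfl
  | append_singleton t f ih =>
    rw [List.foldl_append, List.foldl_cons, List.foldl_nil, ih, List.filter_append]
    by_cases hf : PySem.Str.endswith f ".onnx" = true
    · simp only [List.filter_cons, List.filter_nil, hf, if_pos]
      cases hft : t.filter (fun f => PySem.Str.endswith f ".onnx") with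
      | nil =>
        simp only [pvStepB, hf, if_pos, List.nil_append, pvAres_single]
        rfl
      | cons a s =>
        have hne : (a :: s : List String) ≠ [] := by simp
        have hstep := pvStep (a :: s) f hne
        have hgd : ∀ g : String, PySem.Dict.getD pvRank g 5 = pvKey g := fun _ => rfl
        simp only [pvStepB, hf, if_pos, hgd]
        by_cases hlt : pvKey f < pvKey (pvAres (a :: s))
        · rw [if_pos hlt] at hstep
          rw [if_pos hlt]
          exact congrArg (fun m => some (pvKey m, m)) hstep
        · rw [if_neg hlt] at hstep
          rw [if_neg hlt]
          exact congrArg (fun m => some (pvKey m, m)) hstep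
    · simp only [List.filter_cons, List.filter_nil, hf]
      simp only [pvStepB, hf, Bool.false_eq_true, if_false, List.append_nil]

-- ===== VERDICT (by name: the statement is the Claim_ definition above) =====
theorem find_onnx_file_py_spec : Claim_equal_find_onnx_file_py := by
  intro repo_id repo_files _ hpre
  unfold Spec_find_onnx_file_py find_onnx_file_py find_onnx_file_py_alt
  obtain ⟨f, hf, hend⟩ := hpre
  have hmem : f ∈ repo_files.filter (fun f => PySem.Str.endswith f ".onnx") :=
    List.mem_filter.mpr ⟨hf, hend⟩
  rw [pvInv repo_files]
  cases hft : repo_files.filter (fun f => PySem.Str.endswith f ".onnx") with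
  | nil => rw [hft] at hmem; exact absurd hmem (List.not_mem_nil)
  | cons a s => simp only [pvAres]
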